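-- pv_equiv track=rewrite | github.com/john-arul1/foobar | cake_split_sym.py | shift_compare
-- ===== SOURCE A (Python) =====
-- def shift_compare(s,n):
--     # rotate and compare
--     N=len(s)
--
--     equal=True
--     for i in range(len(s)):
--         if s[i]!= s[(i+n)%N]:
--            equal =False
--            break
--     return equal
-- ===== SOURCE B (Python) =====
-- def shift_compare(s, n):
--     # rotate-by-n equality as one whole-string comparison
--     N = len(s)
--     if N == 0:
--         return True
--     m = n % N
--     return s == s[m:] + s[:m]
-- ===== Notes on version B (the rewrite author's own statement) =====
-- stated objective: idiomatic
-- what changed: Replaces the element-by-element modular-index loop with a single whole-string comparison against the slice-built rotation s[m:]+s[:m] with m = n % N (empty string returns True).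
import Mathlib
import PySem

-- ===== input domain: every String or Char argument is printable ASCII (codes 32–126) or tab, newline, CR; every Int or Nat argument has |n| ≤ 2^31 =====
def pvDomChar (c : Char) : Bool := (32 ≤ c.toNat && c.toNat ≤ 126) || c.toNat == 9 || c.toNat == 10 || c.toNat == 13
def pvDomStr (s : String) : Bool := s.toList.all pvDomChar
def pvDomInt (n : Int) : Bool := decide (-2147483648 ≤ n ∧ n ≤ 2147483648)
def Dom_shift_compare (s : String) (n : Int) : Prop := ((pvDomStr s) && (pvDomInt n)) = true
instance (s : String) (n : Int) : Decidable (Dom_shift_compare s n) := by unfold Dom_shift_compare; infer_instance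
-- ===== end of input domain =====

-- B replaces A's element-by-element modular-index loop with one whole-string comparison
-- against the slice-built rotation s[m:] + s[:m], m = n % N (idiomatic; same cost).


-- ===== PORT A =====
-- the for-loop with its break: structural recursion over the index list range(len(s))
def shiftLoopA (cs : List Char) (N n : Int) : List Int → Bool
  | [] => true
  | i :: rest =>
    if PySem.List.pyGet? cs i ≠ PySem.List.pyGet? cs (PySem.Int.mod (i + n) N)
    then false
    else shiftLoopA cs N n rest

def shift_compare (s : String) (n : Int) : Bool :=
  let cs := s.toList
  let N : Int := cs.length
  shiftLoopA cs N n (PySem.List.pyRange 0 N 1)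

-- ===== PORT B =====
def shift_compare_alt (s : String) (n : Int) : Bool :=
  let cs := s.toList
  if cs.length = 0 then true
  else
    let m := PySem.Int.mod n (cs.length : Int)
    cs = PySem.List.slice cs (some m) none ++ PySem.List.slice cs none (some m)

-- ===== PRECONDITION & SPEC =====
def Spec_shift_compare (s : String) (n : Int) (out : Bool) : Prop := out = shift_compare_alt s n
instance (s : String) (n : Int) (out : Bool) : Decidable (Spec_shift_compare s n out) := by unfold Spec_shift_compare; infer_instance

-- ===== CLAIM (what is proved, stated in full; the proofs are below) =====
def Claim_equal_shift_compare : Prop := ∀ (s : String) (n : Int), Dom_shift_compare s n → Spec_shift_compare s n (shift_compare s n)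

-- ===== LEMMAS AND PROOFS =====

-- the loop returns true iff every index it visits satisfies the comparison
theorem shiftLoopA_eq_true_iff (cs : List Char) (N n : Int) (L : List Int) :
    shiftLoopA cs N n L = true ↔
      ∀ i ∈ L, PySem.List.pyGet? cs i = PySem.List.pyGet? cs (PySem.Int.mod (i + n) N) := by
  induction L with
  | nil => simp [shiftLoopA]
  | cons i rest ih =>
    by_cases h : PySem.List.pyGet? cs i = PySem.List.pyGet? cs (PySem.Int.mod (i + n) N) <;>
      simp [shiftLoopA, h, ih]

-- modular index (k + n) % N, as a Nat, with m := n % N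
theorem mod_add_eq (N : Nat) (hN : 0 < N) (n : Int) (k : Nat) :
    PySem.Int.mod ((k : Int) + n) (N : Int) = (((k + (PySem.Int.mod n N).toNat) % N : Nat) : Int) := by
  have hpos : (0 : Int) < (N : Int) := by exact_mod_cast hN
  simp only [PySem.Int.mod_eq_emod_of_pos hpos]
  have ht : ((n % (N : Int)).toNat : Int) = n % N := Int.toNat_of_nonneg (Int.emod_nonneg n (by omega))
  push_cast [ht]
  conv_lhs => rw [Int.add_emod, ← Int.emod_emod_of_dvd n (dvd_refl (N : Int)), ← Int.add_emod]

-- the rotation's element at k is cs[(k + m) % N]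
theorem rot_getElem (cs : List Char) (m k : Nat) (hm : m ≤ cs.length)
    (hk : k < cs.length) :
    (cs.drop m ++ cs.take m)[k]'(by simp [List.length_append]; omega) =
      cs[(k + m) % cs.length]'(Nat.mod_lt _ (by omega)) := by
  rcases Nat.lt_or_ge k (cs.length - m) with h | h
  · rw [List.getElem_append_left (by simpa using h)]
    rw [List.getElem_drop]
    congr 1
    rw [Nat.mod_eq_of_lt (by omega)]
    omega
  · rw [List.getElem_append_right (by simpa using h)]
    rw [List.getElem_take]
    congr 1
    have hkm : k + m = (k + m - cs.length) + 1 * cs.length := by omega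
    rw [hkm, Nat.add_mul_mod_self_right, Nat.mod_eq_of_lt (by omega)]
    simp [List.length_drop]
    omega

-- A's loop computes exactly the rotation comparison B performs
theorem loop_eq_rot (cs : List Char) (n : Int) (hN : 0 < cs.length) :
    shiftLoopA cs (cs.length : Int) n (PySem.List.pyRange 0 (cs.length : Int) 1)
      = decide (cs = cs.drop (PySem.Int.mod n (cs.length : Int)).toNat
                      ++ cs.take (PySem.Int.mod n (cs.length : Int)).toNat) := by
  have hpos : (0 : Int) < (cs.length : Int) := by exact_mod_cast hN
  have hm0 : 0 ≤ PySem.Int.mod n (cs.length : Int) := PySem.Int.mod_nonneg n hpos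
  have hmlt : PySem.Int.mod n (cs.length : Int) < (cs.length : Int) := PySem.Int.mod_lt n hpos
  generalize hmn : (PySem.Int.mod n (cs.length : Int)).toNat = mn
  have hmn_le : mn ≤ cs.length := by omega
  have hrot_len : (cs.drop mn ++ cs.take mn).length = cs.length := by
    simp [List.length_append]; omega
  have key : (shiftLoopA cs (cs.length : Int) n (PySem.List.pyRange 0 (cs.length : Int) 1) = true)
      ↔ cs = cs.drop mn ++ cs.take mn := by
    rw [shiftLoopA_eq_true_iff]
    constructor
    · intro hall
      apply List.ext_getElem (by omega)
      intro k hk _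
      have h := hall (k : Int) (by
        rw [PySem.List.mem_pyRange_one]
        constructor
        · positivity
        · exact_mod_cast hk)
      rw [mod_add_eq cs.length hN n k, hmn] at h
      simp only [PySem.List.pyGet?_natCast] at h
      rw [rot_getElem cs mn k hmn_le hk]
      have hmod : (k + mn) % cs.length < cs.length := Nat.mod_lt _ hN
      rw [List.getElem?_eq_getElem hk, List.getElem?_eq_getElem hmod] at h
      exact Option.some_injective _ h
    · intro heq i hi
      rw [PySem.List.mem_pyRange_one] at hi
      obtain ⟨hi0, hilt⟩ := hi
      have hk : i.toNat < cs.length := by omega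
      have hik : i = (i.toNat : Int) := (Int.toNat_of_nonneg hi0).symm
      rw [hik, mod_add_eq cs.length hN n i.toNat, hmn]
      simp only [PySem.List.pyGet?_natCast]
      have hmod : (i.toNat + mn) % cs.length < cs.length := Nat.mod_lt _ hN
      rw [List.getElem?_eq_getElem hk, List.getElem?_eq_getElem hmod]
      have hrot := rot_getElem cs mn i.toNat hmn_le hk
      have hk' : i.toNat < (cs.drop mn ++ cs.take mn).length := by rw [hrot_len]; exact hk
      have h2 := congrArg (fun l => l[i.toNat]?) heq
      simp only [] at h2
      rw [List.getElem?_eq_getElem hk, List.getElem?_eq_getElem hk'] at h2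
      exact h2.trans (congrArg some hrot)
  by_cases hc : cs = cs.drop mn ++ cs.take mn
  · rw [key.mpr hc]
    exact (decide_eq_true hc).symm
  · have hfalse : shiftLoopA cs (cs.length : Int) n (PySem.List.pyRange 0 (cs.length : Int) 1) = false := by
      rw [← Bool.not_eq_true, key]; exact hc
    rw [hfalse]
    exact (decide_eq_false hc).symm

-- ===== VERDICT (by name: the statement is the Claim_ definition above) =====
theorem shift_compare_spec : Claim_equal_shift_compare := by
  intro s n _
  unfold Spec_shift_compare shift_compare shift_compare_alt
  by_cases h0 : s.toList.length = 0
  · simp [h0, shiftLoopA]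
  · have hN : 0 < s.toList.length := Nat.pos_of_ne_zero h0
    have hpos : (0 : Int) < (s.toList.length : Int) := by exact_mod_cast hN
    have hm0 : 0 ≤ PySem.Int.mod n (s.toList.length : Int) := PySem.Int.mod_nonneg n hpos
    simp only [h0, if_false]
    rw [PySem.List.slice_from _ hm0, PySem.List.slice_to _ hm0]
    exact loop_eq_rot s.toList n hN
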